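-- pv_equiv track=rewrite | github.com/jaypennington/pybox | src/unlucky/unlucky.py | unlucky
-- ===== SOURCE A (Python) =====
-- def unlucky(nums):
--     sum = 0
--     is13 = False
--     for num in nums:
--         if num == 13:
--             is13 = True
--             continue
--         if num != 13 and is13:
--             is13 = False
--             continue
--         if num != 13:
--             sum = sum + num
--
--     return sum
-- ===== SOURCE B (Python) =====
-- def unlucky(nums):
--     nums = list(nums)
--     return sum(x for p, x in zip([0] + nums, nums) if x != 13 and p != 13)
-- ===== Notes on version B (the rewrite author's own statement) =====
-- stated objective: idiomatic
-- what changed: Replaces the carried is13 flag and three continue-branches with a stateless pairwise sum: zip each element with its predecessor (0 sentinel in front) and add it only when neither it nor its predecessor is 13.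
import Mathlib
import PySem

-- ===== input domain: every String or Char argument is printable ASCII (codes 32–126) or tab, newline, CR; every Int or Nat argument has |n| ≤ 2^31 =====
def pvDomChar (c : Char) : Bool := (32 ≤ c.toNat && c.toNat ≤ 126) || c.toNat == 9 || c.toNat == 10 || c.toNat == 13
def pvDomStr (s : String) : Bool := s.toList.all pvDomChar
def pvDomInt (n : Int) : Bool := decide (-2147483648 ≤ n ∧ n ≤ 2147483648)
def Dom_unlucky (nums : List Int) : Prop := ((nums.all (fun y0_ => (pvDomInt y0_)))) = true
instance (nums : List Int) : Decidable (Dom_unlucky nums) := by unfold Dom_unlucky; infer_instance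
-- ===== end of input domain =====

-- ===== PORT A =====
-- B replaces A's carried is13 flag with a stateless pairwise (predecessor, element) sum.
def unlucky (nums : List Int) : Int :=
  (nums.foldl (fun (st : Int × Bool) num =>
      if num == 13 then (st.1, true)
      else if num ≠ 13 ∧ st.2 then (st.1, false)
      else if num ≠ 13 then (st.1 + num, st.2)
      else st) ((0 : Int), false)).1

-- ===== PORT B =====
def unlucky_alt (nums : List Int) : Int :=
  (((0 : Int) :: nums).zip nums).foldl
    (fun s px => if px.2 ≠ 13 ∧ px.1 ≠ 13 then s + px.2 else s) 0

-- ===== PRECONDITION & SPEC =====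
def Spec_unlucky (nums : List Int) (out : Int) : Prop := out = unlucky_alt nums
instance (nums : List Int) (out : Int) : Decidable (Spec_unlucky nums out) := by unfold Spec_unlucky; infer_instance

-- ===== CLAIM (what is proved, stated in full; the proofs are below) =====
def Claim_equal_unlucky : Prop := ∀ (nums : List Int), Dom_unlucky nums → Spec_unlucky nums (unlucky nums)

-- ===== LEMMAS AND PROOFS =====

-- ===== VERDICT (by name: the statement is the Claim_ definition above) =====
theorem unlucky_loop (l : List Int) (p s : Int) (b : Bool) (hb : b = (p == 13)) :
    (l.foldl (fun (st : Int × Bool) num =>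
      if num == 13 then (st.1, true)
      else if num ≠ 13 ∧ st.2 then (st.1, false)
      else if num ≠ 13 then (st.1 + num, st.2)
      else st) (s, b)).1
    = ((p :: l).zip l).foldl
        (fun s px => if px.2 ≠ 13 ∧ px.1 ≠ 13 then s + px.2 else s) s := by
  induction l generalizing p s b with
  | nil => simp [List.foldl]
  | cons x t ih =>
    subst hb
    simp only [List.zip_cons_cons, List.foldl_cons]
    by_cases hx : x = 13
    · subst hx
      have h1 : (if ((13:Int) == 13) = true then (s, true)
          else if (13:Int) ≠ 13 ∧ (p == 13) = true then (s, false)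
          else if (13:Int) ≠ 13 then (s + 13, p == 13) else (s, p == 13)) = (s, true) := by simp
      have h2 : (if (13:Int) ≠ 13 ∧ p ≠ 13 then s + 13 else s) = s := by simp
      rw [h1, h2, ih 13 s true (by simp)]
    · by_cases hp : p = 13
      · subst hp
        have h1 : (if (x == 13) = true then (s, true)
            else if x ≠ 13 ∧ ((13:Int) == 13) = true then (s, false)
            else if x ≠ 13 then (s + x, (13:Int) == 13) else (s, (13:Int) == 13)) = (s, false) := by
          simp [hx]
        have h2 : (if x ≠ 13 ∧ (13:Int) ≠ 13 then s + x else s) = s := by simp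
        rw [h1, h2, ih x s false (by simp [hx])]
      · have h1 : (if (x == 13) = true then (s, true)
            else if x ≠ 13 ∧ (p == 13) = true then (s, false)
            else if x ≠ 13 then (s + x, p == 13) else (s, p == 13)) = (s + x, p == 13) := by
          simp [hx, hp]
        have h2 : (if x ≠ 13 ∧ p ≠ 13 then s + x else s) = s + x := by simp [hx, hp]
        have hb' : (p == 13) = (x == 13) := by simp [hx, hp]
        rw [h1, h2, hb', ih x (s + x) (x == 13) rfl]

theorem unlucky_spec : Claim_equal_unlucky := by
  intro nums _
  unfold Spec_unlucky unlucky unlucky_alt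
  exact unlucky_loop nums 0 0 false (by simp)
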